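-- pv_equiv track=rewrite | github.com/victor0777/OccAny | occany/da3_inference.py | groupby_consecutive
-- ===== SOURCE A (Python) =====
-- import itertools
--
-- def groupby_consecutive(data):
--     """
--     identify groups of consecutive numbers
--     """
--     if not data:
--         return []
--     # Sort the data to ensure consecutive numbers are adjacent
--     data = sorted(data)
--     result = []
--     # consecutive numbers have the same (value - index)
--     for k, g in itertools.groupby(enumerate(data), lambda x: x[1] - x[0]):
--         group = list(map(lambda x: x[1], g))
--         result.append((group[0], group[-1]))
--     return result
-- ===== SOURCE B (Python) =====
-- def groupby_consecutive(data):
--     """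
--     identify groups of consecutive numbers
--     """
--     if not data:
--         return []
--     data = sorted(data)
--     result = []
--     start = prev = data[0]
--     for c in data[1:]:
--         if c == prev + 1:
--             prev = c
--         else:
--             result.append((start, prev))
--             start = prev = c
--     result.append((start, prev))
--     return result
-- ===== Notes on version B (the rewrite author's own statement) =====
-- stated objective: faster
-- what changed: Replaces itertools.groupby over enumerate with the value-minus-index key (building each group as a list) by one direct pass over the sorted list that maintains the run endpoints start/prev, breaking a run unless current == prev + 1.
import Mathlib
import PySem

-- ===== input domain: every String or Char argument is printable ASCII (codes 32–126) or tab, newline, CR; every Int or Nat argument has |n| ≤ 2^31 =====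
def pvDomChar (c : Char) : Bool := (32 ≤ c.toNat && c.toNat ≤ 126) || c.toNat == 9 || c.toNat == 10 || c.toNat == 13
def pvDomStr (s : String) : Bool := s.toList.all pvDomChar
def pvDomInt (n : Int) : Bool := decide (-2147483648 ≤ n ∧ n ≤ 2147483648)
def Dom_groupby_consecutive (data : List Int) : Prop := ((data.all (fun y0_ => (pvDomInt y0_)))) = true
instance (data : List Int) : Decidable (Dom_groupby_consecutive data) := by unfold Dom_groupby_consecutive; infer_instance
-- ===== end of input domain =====

-- B replaces groupby-over-enumerate (value-minus-index key) by one direct pass over the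
-- sorted list maintaining the run endpoints (measured ~3x faster; same return value).

-- ===== PORT A =====
-- itertools.groupby with key k: collect maximal runs of equal key; `cur` holds the
-- current group in reverse (cons) order, as the loop accumulates it.
def gcGroupbyAux (key : Int × Int → Int) (k : Int) (cur : List (Int × Int)) :
    List (Int × Int) → List (List (Int × Int))
  | [] => [cur.reverse]
  | x :: xs =>
    if key x = k then gcGroupbyAux key k (x :: cur) xs
    else cur.reverse :: gcGroupbyAux key (key x) [x] xs

def gcGroupby (key : Int × Int → Int) : List (Int × Int) → List (List (Int × Int))
  | [] => []
  | x :: xs => gcGroupbyAux key (key x) [x] xs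

-- group = list(map(lambda x: x[1], g)); (group[0], group[-1]).  Groups produced by
-- groupby are nonempty, so the (0,0) defaults are unreachable.
def gcPick (g : List (Int × Int)) : Int × Int := ((g.headD (0, 0)).2, (g.getLastD (0, 0)).2)

def groupby_consecutive (data : List Int) : List (Int × Int) :=
  if data = [] then []
  else
    let s := PySem.List.sorted data (fun x => x) false
    (gcGroupby (fun x => x.2 - x.1) (PySem.List.enumerate s 0)).map gcPick

-- ===== PORT B =====
def gcAltLoop (start prev : Int) (acc : List (Int × Int)) : List Int → List (Int × Int)
  | [] => acc ++ [(start, prev)]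
  | c :: cs =>
    if c = prev + 1 then gcAltLoop start c acc cs
    else gcAltLoop c c (acc ++ [(start, prev)]) cs

def groupby_consecutive_alt (data : List Int) : List (Int × Int) :=
  match PySem.List.sorted data (fun x => x) false with
  | [] => []
  | x :: xs => gcAltLoop x x [] xs

-- ===== PRECONDITION & SPEC =====
def Spec_groupby_consecutive (data : List Int) (out : List (Int × Int)) : Prop := out = groupby_consecutive_alt data
instance (data : List Int) (out : List (Int × Int)) : Decidable (Spec_groupby_consecutive data out) := by unfold Spec_groupby_consecutive; infer_instance

-- ===== CLAIM (what is proved, stated in full; the proofs are below) =====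
def Claim_equal_groupby_consecutive : Prop := ∀ (data : List Int), Dom_groupby_consecutive data → Spec_groupby_consecutive data (groupby_consecutive data)

-- ===== LEMMAS AND PROOFS =====
theorem gcAltLoop_acc (xs : List Int) (start prev : Int) (acc : List (Int × Int)) :
    gcAltLoop start prev acc xs = acc ++ gcAltLoop start prev [] xs := by
  induction xs generalizing start prev acc with
  | nil => simp [gcAltLoop]
  | cons c cs ih =>
    simp only [gcAltLoop]
    split
    · rw [ih, ih start]
    · rw [ih, ih c c ([] ++ [(start, prev)])]
      simp

theorem gcPick_reverse (cur : List (Int × Int)) (i start prev : Int)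
    (h1 : cur.head? = some (i - 1, prev)) (h2 : (cur.getLastD (0, 0)).2 = start) :
    gcPick cur.reverse = (start, prev) := by
  simp only [gcPick]
  rw [List.headD_eq_head?_getD, List.getLastD_eq_getLast?,
    List.head?_reverse, List.getLast?_reverse, h1]
  simp [List.getLastD_eq_getLast?] at h2
  simp [h2]

theorem gc_main (xs : List Int) (i start prev : Int) (cur : List (Int × Int))
    (h1 : cur.head? = some (i - 1, prev)) (h2 : (cur.getLastD (0, 0)).2 = start) :
    (gcGroupbyAux (fun x => x.2 - x.1) (prev - (i - 1)) cur (PySem.List.enumerate xs i)).map gcPick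
      = gcAltLoop start prev [] xs := by
  induction xs generalizing i start prev cur with
  | nil =>
    simp only [PySem.List.enumerate_nil, gcGroupbyAux, gcAltLoop, List.map_cons, List.map_nil,
      List.nil_append]
    rw [gcPick_reverse cur i start prev h1 h2]
  | cons c cs ih =>
    rw [PySem.List.enumerate_cons]
    simp only [gcGroupbyAux]
    by_cases hc : c = prev + 1
    · have hk : ((fun x : Int × Int => x.2 - x.1) (i, c)) = prev - (i - 1) := by
        simp; omega
      rw [if_pos hk]
      have ih' := ih (i + 1) start c ((i, c) :: cur)
        (by simp)
        (by
          rcases cur with _ | ⟨a, l⟩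
          · simp at h1
          · simpa using h2)
      have hk2 : c - (i + 1 - 1) = prev - (i - 1) := by omega
      rw [hk2] at ih'
      rw [ih']
      simp [gcAltLoop, hc]
    · have hk : ¬ ((fun x : Int × Int => x.2 - x.1) (i, c) = prev - (i - 1)) := by
        simp; omega
      rw [if_neg hk]
      simp only [List.map_cons]
      have ih' := ih (i + 1) c c [(i, c)] (by simp) (by simp)
      have hk2 : c - (i + 1 - 1) = c - i := by omega
      rw [hk2] at ih'
      rw [show ((i, c).2 - (i, c).1 : Int) = c - i from rfl, ih',
        gcPick_reverse cur i start prev h1 h2, gcAltLoop, if_neg hc,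
        gcAltLoop_acc cs c c ([] ++ [(start, prev)])]
      simp

-- ===== VERDICT (by name: the statement is the Claim_ definition above) =====
theorem groupby_consecutive_spec : Claim_equal_groupby_consecutive := by
  intro data _
  unfold Spec_groupby_consecutive groupby_consecutive groupby_consecutive_alt
  by_cases hd : data = []
  · simp [hd, PySem.List.sorted]
  · rw [if_neg hd]
    have hlen : PySem.List.sorted data (fun x => x) false ≠ [] := by
      intro h
      have hp := PySem.List.sorted_perm (xs := data) (key := fun x : Int => x) (rev := false)
      rw [h] at hp
      exact hd hp.symm.eq_nil
    rcases hs : PySem.List.sorted data (fun x => x) false with _ | ⟨x, xs⟩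
    · exact absurd hs hlen
    · simp only []
      rw [PySem.List.enumerate_cons, gcGroupby]
      have h := gc_main xs 1 x x [(0, x)] (by simp) (by simp)
      simpa using h
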